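-- pv_equiv track=rewrite | github.com/TendTo/IAC-AD | ansible/filter_plugins/updateDictsByIdx.py | updateDictsByIdx
-- ===== SOURCE A (Python) =====
-- def updateDictsByIdx(
--
--     dicts: "list[dict]",
--     idx: "int",
--     update_dict: "dict",
-- ) -> "list[dict]":
--     updated_dicts: "list[dict]" = []
--
--     for i, d in enumerate(dicts):
--         updated_d = d.copy()
--         if i == idx:
--             updated_d.update(update_dict)
--         updated_dicts.append(updated_d)
--
--     return updated_dicts
-- ===== SOURCE B (Python) =====
-- def updateDictsByIdx(
--     dicts: "list[dict]",
--     idx: "int",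
--     update_dict: "dict",
-- ) -> "list[dict]":
--     # Divide and conquer: split the list in half, solve each half with the
--     # index shifted by the left half's length, and concatenate. The update
--     # fires exactly when a singleton is reached with idx == 0.
--     n = len(dicts)
--     if n == 0:
--         return []
--     if n == 1:
--         d = dicts[0].copy()
--         if idx == 0:
--             d.update(update_dict)
--         return [d]
--     mid = n // 2
--     return (updateDictsByIdx(dicts[:mid], idx, update_dict)
--             + updateDictsByIdx(dicts[mid:], idx - mid, update_dict))
-- ===== Notes on version B (the rewrite author's own statement) =====
-- stated objective: alternative
-- what changed: B solves the problem by divide and conquer: it splits the list in half, recurses on each half with the index shifted by the left half's length, and concatenates, updating a dict only when a singleton with idx == 0 is reached; A is a single iterative loop testing i == idx for every element.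
import Mathlib
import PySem

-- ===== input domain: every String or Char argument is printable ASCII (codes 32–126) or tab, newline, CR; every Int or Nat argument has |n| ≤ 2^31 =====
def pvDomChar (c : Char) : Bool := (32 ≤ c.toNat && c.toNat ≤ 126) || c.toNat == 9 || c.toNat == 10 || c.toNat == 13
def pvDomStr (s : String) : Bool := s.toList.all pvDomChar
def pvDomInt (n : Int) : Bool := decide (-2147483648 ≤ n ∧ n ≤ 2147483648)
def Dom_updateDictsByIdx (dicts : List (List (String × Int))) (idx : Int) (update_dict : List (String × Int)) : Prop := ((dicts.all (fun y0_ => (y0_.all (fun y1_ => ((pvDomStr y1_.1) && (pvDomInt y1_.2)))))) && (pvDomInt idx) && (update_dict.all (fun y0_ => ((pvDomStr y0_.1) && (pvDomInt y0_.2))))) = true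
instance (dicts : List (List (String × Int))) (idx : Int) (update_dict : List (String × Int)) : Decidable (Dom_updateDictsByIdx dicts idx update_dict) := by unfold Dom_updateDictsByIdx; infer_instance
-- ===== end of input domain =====

-- B: divide-and-conquer — split the list in half, recurse with a shifted index, concatenate; a different algorithm than A's counting loop.


-- ===== PORT A =====
-- shared primitive: Python dict.update on the association-list representation of a dict
def pyDictUpdate (d u : List (String × Int)) : List (String × Int) :=
  (PySem.Dict.update (PySem.Dict.mk d) u).items

def updateDictsByIdx (dicts : List (List (String × Int))) (idx : Int) (update_dict : List (String × Int)) : List (List (String × Int)) :=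
  (PySem.List.enumerate dicts).foldl
    (fun updated_dicts p =>
      -- updated_d = d.copy(); if i == idx: updated_d.update(update_dict)
      updated_dicts ++ [if p.1 = idx then pyDictUpdate p.2 update_dict else p.2])
    []

-- ===== PORT B =====
-- divide and conquer on the list; dicts[:mid] / dicts[mid:] with 0 ≤ mid ≤ len are List.take / List.drop exactly
def updateDictsByIdx_alt (dicts : List (List (String × Int))) (idx : Int) (update_dict : List (String × Int)) : List (List (String × Int)) :=
  match dicts with
  | [] => []
  | [d] => [if idx = 0 then pyDictUpdate d update_dict else d]
  | d1 :: d2 :: rest =>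
    let n := (d1 :: d2 :: rest).length
    let mid := n / 2
    updateDictsByIdx_alt ((d1 :: d2 :: rest).take mid) idx update_dict ++
      updateDictsByIdx_alt ((d1 :: d2 :: rest).drop mid) (idx - (mid : Int)) update_dict
termination_by dicts.length
decreasing_by
  · simp [List.length_take]; omega
  · simp [List.length_drop]; omega

-- ===== PRECONDITION & SPEC =====
def Spec_updateDictsByIdx (dicts : List (List (String × Int))) (idx : Int) (update_dict : List (String × Int)) (out : List (List (String × Int))) : Prop := out = updateDictsByIdx_alt dicts idx update_dict
instance (dicts : List (List (String × Int))) (idx : Int) (update_dict : List (String × Int)) (out : List (List (String × Int))) : Decidable (Spec_updateDictsByIdx dicts idx update_dict out) := by unfold Spec_updateDictsByIdx; infer_instance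

-- ===== CLAIM =====
def Claim_equal_updateDictsByIdx : Prop := ∀ (dicts : List (List (String × Int))) (idx : Int) (update_dict : List (String × Int)), Dom_updateDictsByIdx dicts idx update_dict → Spec_updateDictsByIdx dicts idx update_dict (updateDictsByIdx dicts idx update_dict)

-- ===== LEMMAS AND PROOFS =====

-- reference function: positional update by structural recursion (both ports reduce to it)
def updOne (u : List (String × Int)) : List (List (String × Int)) → Int → List (List (String × Int))
  | [], _ => []
  | d :: t, idx => (if idx = 0 then pyDictUpdate d u else d) :: updOne u t (idx - 1)

-- A's append-accumulator loop is init ++ map of the loop body over the list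
theorem foldl_append_map {α β : Type} (f : α → β) :
    ∀ (l : List α) (init : List β),
      l.foldl (fun acc p => acc ++ [f p]) init = init ++ l.map f := by
  intro l
  induction l with
  | nil => intro init; simp
  | cons x xs ih => intro init; simp [List.foldl_cons, ih]

-- the mapped enumerate body is updOne with the index shifted by the start
theorem map_enumerate_eq_updOne (u : List (String × Int)) (idx : Int) :
    ∀ (xs : List (List (String × Int))) (s : Int),
      (PySem.List.enumerate xs s).map
          (fun p => if p.1 = idx then pyDictUpdate p.2 u else p.2)
        = updOne u xs (idx - s) := by
  intro xs
  induction xs with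
  | nil => intro s; simp [PySem.List.enumerate_nil, updOne]
  | cons d t ih =>
    intro s
    rw [PySem.List.enumerate_cons]
    simp only [List.map_cons, updOne, ih (s + 1)]
    have h2 : idx - (s + 1) = idx - s - 1 := by omega
    rw [h2]
    congr 1
    by_cases hs : s = idx
    · simp [hs]
    · have : ¬ idx - s = 0 := by omega
      simp [hs, this]

theorem updateDictsByIdx_eq_updOne (dicts : List (List (String × Int))) (idx : Int)
    (u : List (String × Int)) :
    updateDictsByIdx dicts idx u = updOne u dicts idx := by
  unfold updateDictsByIdx
  rw [foldl_append_map, List.nil_append, map_enumerate_eq_updOne]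
  norm_num

-- updOne splits over append, shifting the index by the left length
theorem updOne_append (u : List (String × Int)) :
    ∀ (xs ys : List (List (String × Int))) (idx : Int),
      updOne u (xs ++ ys) idx = updOne u xs idx ++ updOne u ys (idx - (xs.length : Int)) := by
  intro xs
  induction xs with
  | nil => intro ys idx; simp [updOne]
  | cons d t ih =>
    intro ys idx
    simp only [List.cons_append, updOne, ih, List.length_cons]
    have : idx - 1 - (t.length : Int) = idx - ((t.length : Int) + 1) := by omega
    rw [this]
    push_cast
    ring_nf

-- B computes updOne (strong induction on the length, following the halving recursion)
theorem alt_eq_updOne :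
    ∀ (n : Nat) (dicts : List (List (String × Int))), dicts.length ≤ n →
      ∀ (idx : Int) (u : List (String × Int)),
        updateDictsByIdx_alt dicts idx u = updOne u dicts idx := by
  intro n
  induction n with
  | zero =>
    intro dicts h idx u
    have : dicts = [] := List.eq_nil_of_length_eq_zero (Nat.le_zero.mp h)
    subst this
    simp [updateDictsByIdx_alt, updOne]
  | succ m ih =>
    intro dicts h idx u
    match dicts with
    | [] => simp [updateDictsByIdx_alt, updOne]
    | [d] => simp [updateDictsByIdx_alt, updOne]
    | d1 :: d2 :: rest =>
      rw [updateDictsByIdx_alt]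
      have hlen : (d1 :: d2 :: rest).length = rest.length + 2 := by simp
      set xs := d1 :: d2 :: rest with hxs
      set mid := xs.length / 2 with hmid
      have hmid1 : 1 ≤ mid := by simp [hmid, hlen]
      have hmidlt : mid < xs.length := by simp [hmid]; omega
      have htake : (xs.take mid).length ≤ m := by
        simp [List.length_take]
        omega
      have hdrop : (xs.drop mid).length ≤ m := by
        simp [List.length_drop]
        omega
      rw [ih _ htake, ih _ hdrop]
      have htl : ((xs.take mid).length : Int) = (mid : Int) := by
        simp [List.length_take]; omega
      calc updOne u (xs.take mid) idx ++ updOne u (xs.drop mid) (idx - (mid : Int))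
          = updOne u (xs.take mid) idx ++ updOne u (xs.drop mid) (idx - ((xs.take mid).length : Int)) := by rw [htl]
        _ = updOne u (xs.take mid ++ xs.drop mid) idx := (updOne_append u _ _ idx).symm
        _ = updOne u xs idx := by rw [List.take_append_drop]

-- ===== VERDICT =====
theorem updateDictsByIdx_spec : Claim_equal_updateDictsByIdx := by
  intro dicts idx u _
  unfold Spec_updateDictsByIdx
  rw [updateDictsByIdx_eq_updOne, alt_eq_updOne dicts.length dicts (le_refl _)]
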